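-- pv_equiv track=rewrite | github.com/MinKapout/ChainReaction | 3.6.1.py | alignementLignes
-- ===== SOURCE A (Python) =====
-- def alignementLignes(joueur, plateau=[[]]):
--     for x in plateau:
--         total = 0
--         for y in x:
--             if y == joueur:
--                 total += 1
--             else:
--                 total = 0
--         if total >= 3:
--             return True
--     return False
-- ===== SOURCE B (Python) =====
-- def alignementLignes(joueur, plateau=[[]]):
--     return any(any(a == b == c == joueur for a, b, c in zip(x, x[1:], x[2:]))
--                for x in plateau)
-- ===== Notes on version B (the rewrite author's own statement) =====
-- stated objective: idiomatic
-- what changed: B replaces A's per-row counter loop with an any() over the triples zip(x, x[1:], x[2:]), detecting three consecutive marks anywhere in a row.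
-- intended difference: On boards where some row contains three consecutive joueur cells but no row ends with three, A returns False (it only tests the counter after the loop, so only a trailing run counts) while B returns True, which is the intended '3 aligned in a row' check. — e.g. on alignementLignes(1, [[1, 1, 1, 0]]): A returns false, B returns true
import Mathlib
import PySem

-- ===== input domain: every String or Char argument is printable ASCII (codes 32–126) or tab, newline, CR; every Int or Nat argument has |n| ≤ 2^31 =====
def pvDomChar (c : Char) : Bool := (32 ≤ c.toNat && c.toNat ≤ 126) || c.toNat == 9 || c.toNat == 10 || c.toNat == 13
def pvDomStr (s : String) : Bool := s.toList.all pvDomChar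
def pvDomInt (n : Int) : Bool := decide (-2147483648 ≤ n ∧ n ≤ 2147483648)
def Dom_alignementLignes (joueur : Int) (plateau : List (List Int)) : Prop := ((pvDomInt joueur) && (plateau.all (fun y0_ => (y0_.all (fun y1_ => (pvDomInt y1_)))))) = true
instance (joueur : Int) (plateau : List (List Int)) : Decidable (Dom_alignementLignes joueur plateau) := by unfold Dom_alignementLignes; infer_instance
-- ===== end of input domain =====

-- B checks for three consecutive `joueur` cells anywhere in a row (an any() over
-- zip(x, x[1:], x[2:])) instead of A's counter scan that is only tested after the
-- row loop; objective: idiomatic (B also fixes A's trailing-run-only bug, see D_).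

-- ===== PORT A =====
-- inner loop of A: run counter over one row, reset to 0 on mismatch
def pvRowTotal (joueur : Int) (x : List Int) : Int :=
  x.foldl (fun total y => if y == joueur then total + 1 else 0) 0

def alignementLignes (joueur : Int) (plateau : List (List Int)) : Bool :=
  match plateau with
  | [] => false
  | x :: rest =>
      if 3 ≤ pvRowTotal joueur x then true
      else alignementLignes joueur rest

-- ===== PORT B =====
def alignementLignes_alt (joueur : Int) (plateau : List (List Int)) : Bool :=
  plateau.any (fun x =>
    ((x.zip (PySem.List.slice x (some 1) none)).zip (PySem.List.slice x (some 2) none)).any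
      (fun abc => abc.1.1 == abc.1.2 && abc.1.2 == abc.2 && abc.2 == joueur))

-- ===== PRECONDITION & SPEC =====
-- helpers for D_ (input-shape conditions, independent of both ports):
-- some window of three consecutive cells all equal to joueur
def pvHasTriple (joueur : Int) : List Int → Bool
  | a :: b :: c :: t => (a == joueur && b == joueur && c == joueur) || pvHasTriple joueur (b :: c :: t)
  | _ => false

-- the row's last three cells all equal joueur
def pvTrailingTriple (joueur : Int) (x : List Int) : Bool :=
  match x.reverse with
  | a :: b :: c :: _ => a == joueur && b == joueur && c == joueur
  | _ => false

-- On boards where some row contains three consecutive joueur cells but no row ENDS with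
-- three, A returns False (it tests its counter only after the loop, so only a trailing
-- run counts) while B returns True, the intended '3 aligned in a row' answer.
def D_alignementLignes (joueur : Int) (plateau : List (List Int)) : Prop :=
  plateau.any (pvHasTriple joueur) = true ∧ plateau.any (pvTrailingTriple joueur) = false
instance (joueur : Int) (plateau : List (List Int)) : Decidable (D_alignementLignes joueur plateau) := by unfold D_alignementLignes; infer_instance

def Spec_alignementLignes (joueur : Int) (plateau : List (List Int)) (out : Bool) : Prop := ¬ D_alignementLignes joueur plateau → out = alignementLignes_alt joueur plateau
instance (joueur : Int) (plateau : List (List Int)) (out : Bool) : Decidable (Spec_alignementLignes joueur plateau out) := by unfold Spec_alignementLignes; infer_instance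

def pvDiffWitness_alignementLignes : Int × List (List Int) := (1, [[1, 1, 1, 0]])
def pvDiffWitnessOut_alignementLignes : Bool × Bool := (false, true)

-- ===== CLAIM (what is proved, stated in full; the proofs are below) =====
def Claim_unchanged_alignementLignes : Prop := ∀ (joueur : Int) (plateau : List (List Int)), Dom_alignementLignes joueur plateau → Spec_alignementLignes joueur plateau (alignementLignes joueur plateau)
def Claim_changed_alignementLignes : Prop := Dom_alignementLignes (pvDiffWitness_alignementLignes.1) (pvDiffWitness_alignementLignes.2) ∧ D_alignementLignes (pvDiffWitness_alignementLignes.1) (pvDiffWitness_alignementLignes.2) ∧ alignementLignes (pvDiffWitness_alignementLignes.1) (pvDiffWitness_alignementLignes.2) = pvDiffWitnessOut_alignementLignes.1 ∧ alignementLignes_alt (pvDiffWitness_alignementLignes.1) (pvDiffWitness_alignementLignes.2) = pvDiffWitnessOut_alignementLignes.2 ∧ pvDiffWitnessOut_alignementLignes.1 ≠ pvDiffWitnessOut_alignementLignes.2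
def Claim_exact_alignementLignes : Prop := ∀ (joueur : Int) (plateau : List (List Int)), Dom_alignementLignes joueur plateau → D_alignementLignes joueur plateau → alignementLignes joueur plateau ≠ alignementLignes_alt joueur plateau

-- ===== LEMMAS AND PROOFS =====

-- prefix-run length of `joueur` seen from the front (used on the reversed row)
def pvPrefRun (joueur : Int) : List Int → Int
  | [] => 0
  | y :: ys => if y == joueur then pvPrefRun joueur ys + 1 else 0

theorem pvPrefRun_nonneg (joueur : Int) (l : List Int) : 0 ≤ pvPrefRun joueur l := by
  induction l with
  | nil => simp [pvPrefRun]
  | cons y ys ih => simp only [pvPrefRun]; split <;> omega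

-- A's final counter over a row is the prefix run of the reversed row
theorem pvRowTotal_eq (joueur : Int) (x : List Int) :
    pvRowTotal joueur x = pvPrefRun joueur x.reverse := by
  induction x using List.reverseRecOn with
  | nil => rfl
  | append_singleton xs y ih =>
      simp [pvRowTotal, List.foldl_append, pvPrefRun] at *
      split
      all_goals simp_all

-- A fires on a row iff its last three cells equal joueur
theorem pvRow_trailing (joueur : Int) (x : List Int) :
    decide (3 ≤ pvRowTotal joueur x) = pvTrailingTriple joueur x := by
  rw [pvRowTotal_eq, pvTrailingTriple]
  match hr : x.reverse with
  | [] => simp [pvPrefRun]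
  | [a] => simp [pvPrefRun]; split_ifs <;> simp
  | [a, b] => simp [pvPrefRun]; split_ifs <;> simp
  | a :: b :: c :: t =>
      have hn := pvPrefRun_nonneg joueur t
      simp [pvPrefRun]
      split_ifs <;> simp_all <;> omega

-- A = any row has a trailing triple
theorem pvA_char (joueur : Int) (plateau : List (List Int)) :
    alignementLignes joueur plateau = plateau.any (pvTrailingTriple joueur) := by
  induction plateau with
  | nil => rfl
  | cons x rest ih =>
      rw [alignementLignes, List.any_cons, ← pvRow_trailing, ← ih]
      by_cases h : 3 ≤ pvRowTotal joueur x <;> simp [h]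

-- B = any row has a triple somewhere
theorem pvB_row (joueur : Int) (x : List Int) :
    ((x.zip (PySem.List.slice x (some 1) none)).zip (PySem.List.slice x (some 2) none)).any
      (fun abc => abc.1.1 == abc.1.2 && abc.1.2 == abc.2 && abc.2 == joueur)
    = pvHasTriple joueur x := by
  rw [PySem.List.slice_from _ (by omega), PySem.List.slice_from _ (by omega)]
  induction x using pvHasTriple.induct with
  | case1 a b c t ih =>
      rw [show (1 : Int).toNat = 1 by rfl, show (2 : Int).toNat = 2 by rfl] at *
      simp only [List.drop_succ_cons, List.drop_zero, List.zip_cons_cons, List.any_cons,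
        pvHasTriple] at *
      rw [ih]
      have key : (a == b && b == c && c == joueur) = (a == joueur && b == joueur && c == joueur) := by
        rw [Bool.eq_iff_iff]
        simp only [Bool.and_eq_true, beq_iff_eq]
        omega
      rw [key]
  | case2 x h =>
      match x with
      | [] => rfl
      | [a] => rfl
      | [a, b] => rfl
      | a :: b :: c :: t => exact absurd rfl (h a b c t)

theorem pvB_char (joueur : Int) (plateau : List (List Int)) :
    alignementLignes_alt joueur plateau = plateau.any (pvHasTriple joueur) := by
  unfold alignementLignes_alt
  congr 1
  funext x
  exact pvB_row joueur x

-- a triple stays a triple when cells are prepended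
theorem pvHasTriple_cons (joueur a : Int) (t : List Int) (h : pvHasTriple joueur t = true) :
    pvHasTriple joueur (a :: t) = true := by
  match t with
  | b :: c :: d :: t' =>
      rw [pvHasTriple]
      simp [h]
  | [] | [_] | [_, _] => simp [pvHasTriple] at h

-- a trailing triple is in particular a triple
theorem pvTrailing_imp (joueur : Int) (x : List Int) (h : pvTrailingTriple joueur x = true) :
    pvHasTriple joueur x = true := by
  rw [pvTrailingTriple] at h
  match hr : x.reverse with
  | [] | [_] | [_, _] => rw [hr] at h; simp at h
  | a :: b :: c :: t =>
      rw [hr] at h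
      simp only [Bool.and_eq_true, beq_iff_eq] at h
      obtain ⟨⟨ha, hb⟩, hc⟩ := h
      have hx : x = t.reverse ++ [c, b, a] := by
        have := congrArg List.reverse hr
        simpa using this
      subst hx ha hb hc
      clear hr
      induction t.reverse with
      | nil => simp [pvHasTriple]
      | cons z l ih => exact pvHasTriple_cons _ _ _ ih

-- ===== VERDICT (by name: the statements are the Claim_ definitions above) =====
theorem alignementLignes_spec : Claim_unchanged_alignementLignes := by
  intro joueur plateau _ hnd
  rw [pvA_char, pvB_char]
  unfold D_alignementLignes at hnd
  by_cases ht : plateau.any (pvTrailingTriple joueur) = true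
  · rw [ht]
    rcases List.any_eq_true.mp ht with ⟨x, hx, hxt⟩
    exact (List.any_eq_true.mpr ⟨x, hx, pvTrailing_imp _ _ hxt⟩).symm
  · have ht' : plateau.any (pvTrailingTriple joueur) = false := by
      simpa using ht
    have hh : plateau.any (pvHasTriple joueur) = false := by
      by_contra hc
      exact hnd ⟨by simpa using hc, ht'⟩
    rw [ht', hh]

theorem alignementLignes_changed : Claim_changed_alignementLignes := by
  unfold Claim_changed_alignementLignes; decide

theorem alignementLignes_tight : Claim_exact_alignementLignes := by
  intro joueur plateau _ hd
  rw [pvA_char, pvB_char, hd.2, hd.1]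
  simp
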